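-- pv_equiv track=rewrite | github.com/bisma-786/hackathon | backend/src/ingestion/parser.py | _build_heading_hierarchy_with_nesting
-- ===== SOURCE A (Python) =====
-- from typing import Any, Dict, List
--
-- def _build_heading_hierarchy_with_nesting(headings: List[Dict[str, str]]) -> List[Dict[str, Any]]:
--     """
--     Build a proper heading hierarchy with nesting information.
--
--     Args:
--         headings: List of heading dictionaries
--
--     Returns:
--         List of heading dictionaries with nesting information
--     """
--     if not headings:
--         return []
--
--     # Create a hierarchy structure with parent-child relationships
--     hierarchy = []
--     stack = []  # Stack to track the current hierarchy path
--
--     for heading in headings: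
--         current_level = heading['level']
--         current_text = heading['text']
--
--         # Pop from stack until we find the right parent level
--         while stack and stack[-1]['level'] >= current_level:
--             stack.pop()
--
--         # Create the hierarchy entry
--         hierarchy_entry = {
--             'level': current_level,
--             'text': current_text,
--             'parent': stack[-1]['text'] if stack else None
--         }
--
--         hierarchy.append(hierarchy_entry)
--         stack.append(hierarchy_entry)
--
--     return hierarchy
-- ===== SOURCE B (Python) =====
-- from typing import Any, Dict, List
--
-- def _build_heading_hierarchy_with_nesting(headings: List[Dict[str, str]]) -> List[Dict[str, Any]]:
--     """Stack-free re-implementation: each heading's parent is the nearest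
--     earlier heading whose 'level' is strictly smaller (previous-smaller scan)."""
--     hierarchy = []
--     for i, heading in enumerate(headings):
--         level = heading['level']
--         parent = None
--         for j in range(i - 1, -1, -1):
--             if headings[j]['level'] < level:
--                 parent = headings[j]['text']
--                 break
--         hierarchy.append({'level': level, 'text': heading['text'], 'parent': parent})
--     return hierarchy
-- ===== Notes on version B (the rewrite author's own statement) =====
-- stated objective: alternative
-- what changed: Replaces the stack maintained across iterations by a stackless previous-smaller-element formulation: each heading's parent is found by scanning earlier headings backward for the first strictly smaller 'level'.
import Mathlib
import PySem

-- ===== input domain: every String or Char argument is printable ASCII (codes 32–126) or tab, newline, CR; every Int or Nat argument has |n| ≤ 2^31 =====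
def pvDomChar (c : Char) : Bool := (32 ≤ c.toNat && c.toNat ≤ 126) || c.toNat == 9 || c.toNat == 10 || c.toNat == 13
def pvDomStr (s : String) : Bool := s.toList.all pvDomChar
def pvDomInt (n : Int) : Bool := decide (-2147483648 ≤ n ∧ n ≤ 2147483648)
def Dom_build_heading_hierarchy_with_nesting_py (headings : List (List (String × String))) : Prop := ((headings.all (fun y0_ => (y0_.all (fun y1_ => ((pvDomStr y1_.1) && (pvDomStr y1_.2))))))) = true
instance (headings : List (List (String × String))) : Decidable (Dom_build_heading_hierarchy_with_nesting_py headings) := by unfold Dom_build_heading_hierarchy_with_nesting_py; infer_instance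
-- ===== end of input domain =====

-- B removes A's stack: each heading's parent is found by a backward scan of the
-- earlier headings for the first strictly smaller 'level' (previous-smaller-element).
-- Equivalence proved on inputs where every heading dict has 'level' and 'text' keys
-- (elsewhere Python A raises KeyError).

-- ===== PORT A =====
-- heading['level'] / heading['text']: first match in the association list; default "" is
-- unreachable under Pre_ (Python raises KeyError there).
def pvLvl (h : List (String × String)) : String :=
  ((h.find? (fun p => p.1 == "level")).map (·.2)).getD ""

def pvTxt (h : List (String × String)) : String :=
  ((h.find? (fun p => p.1 == "text")).map (·.2)).getD ""

-- the hierarchy_entry dict, in insertion order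
def pvEntry (lvl txt : String) (parent : Option String) : List (String × Option String) :=
  [("level", some lvl), ("text", some txt), ("parent", parent)]

-- A's loop; stack top is the HEAD of `stack`, each element is (level, text) of a pushed entry.
-- The while-pop loop is dropWhile (stack[-1]['level'] >= current_level).
def pvGoA (stack : List (String × String)) : List (List (String × String)) → List (List (String × Option String))
  | [] => []
  | h :: rest =>
    let lvl := pvLvl h
    let txt := pvTxt h
    let stack' := stack.dropWhile (fun e => lvl ≤ e.1)
    let parent := stack'.head?.map (·.2)
    pvEntry lvl txt parent :: pvGoA ((lvl, txt) :: stack') rest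

def build_heading_hierarchy_with_nesting_py (headings : List (List (String × String))) : List (List (String × Option String)) :=
  if headings.isEmpty then [] else pvGoA [] headings

-- ===== PORT B =====
-- Source B's inner loop: j from i-1 down to 0, first earlier heading with level < lvl.
-- `seen` is the already-scanned prefix in reverse (index i-1 first), matching the backward range.
def pvParentB (lvl : String) : List (List (String × String)) → Option String
  | [] => none
  | h :: rest => if pvLvl h < lvl then some (pvTxt h) else pvParentB lvl rest

def pvGoB (seen : List (List (String × String))) : List (List (String × String)) → List (List (String × Option String))
  | [] => []
  | h :: rest => pvEntry (pvLvl h) (pvTxt h) (pvParentB (pvLvl h) seen) :: pvGoB (h :: seen) rest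

def build_heading_hierarchy_with_nesting_py_alt (headings : List (List (String × String))) : List (List (String × Option String)) :=
  pvGoB [] headings

-- ===== PRECONDITION & SPEC =====
-- Pre_ excludes exactly the inputs where Python A raises KeyError: a heading dict
-- missing the 'level' or 'text' key.
def Pre_build_heading_hierarchy_with_nesting_py (headings : List (List (String × String))) : Prop :=
  (headings.all (fun h => (h.find? (fun p => p.1 == "level")).isSome && (h.find? (fun p => p.1 == "text")).isSome)) = true

instance (headings : List (List (String × String))) : Decidable (Pre_build_heading_hierarchy_with_nesting_py headings) := by
  unfold Pre_build_heading_hierarchy_with_nesting_py; infer_instance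

def pvWitness_build_heading_hierarchy_with_nesting_py : (List (List (String × String))) :=
  [[("level", "1"), ("text", "intro")], [("level", "2"), ("text", "sub")]]

def Spec_build_heading_hierarchy_with_nesting_py (headings : List (List (String × String))) (out : List (List (String × Option String))) : Prop := out = build_heading_hierarchy_with_nesting_py_alt headings
instance (headings : List (List (String × String))) (out : List (List (String × Option String))) : Decidable (Spec_build_heading_hierarchy_with_nesting_py headings out) := by unfold Spec_build_heading_hierarchy_with_nesting_py; infer_instance

-- ===== CLAIM (what is proved, stated in full; the proofs are below) =====
def Claim_equal_build_heading_hierarchy_with_nesting_py : Prop := ∀ (headings : List (List (String × String))), Dom_build_heading_hierarchy_with_nesting_py headings → Pre_build_heading_hierarchy_with_nesting_py headings → Spec_build_heading_hierarchy_with_nesting_py headings (build_heading_hierarchy_with_nesting_py headings)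

-- ===== LEMMAS AND PROOFS =====

-- dropping with a weaker predicate after a stronger one is the same as dropping once
lemma pv_dropWhile_dropWhile {α : Type} {p q : α → Bool} (hpq : ∀ x, q x = true → p x = true) :
    ∀ xs : List α, (xs.dropWhile q).dropWhile p = xs.dropWhile p := by
  intro xs
  induction xs with
  | nil => rfl
  | cons a t ih =>
    by_cases hq : q a = true
    · simp [hq, hpq a hq, ih]
    · simp [List.dropWhile_cons, hq]

-- B's backward scan as a find? over the reversed prefix
lemma pvParentB_eq_find (lvl : String) :
    ∀ seen : List (List (String × String)),
      pvParentB lvl seen = (seen.find? (fun h => decide (pvLvl h < lvl))).map pvTxt := by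
  intro seen
  induction seen with
  | nil => rfl
  | cons h t ih =>
    by_cases hc : pvLvl h < lvl
    · simp [pvParentB, List.find?, hc]
    · simp [pvParentB, List.find?, hc, ih]

-- the stack/scan invariant: popping all levels ≥ L exposes exactly the most recent
-- earlier heading with level < L
def pvInv (seen : List (List (String × String))) (stack : List (String × String)) : Prop :=
  ∀ L : String,
    (stack.dropWhile (fun e => L ≤ e.1)).head? =
      (seen.find? (fun h => decide (pvLvl h < L))).map (fun h => (pvLvl h, pvTxt h))

lemma pvInv_step (seen : List (List (String × String))) (stack : List (String × String))
    (h : List (String × String)) (hinv : pvInv seen stack) :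
    pvInv (h :: seen) ((pvLvl h, pvTxt h) :: stack.dropWhile (fun e => pvLvl h ≤ e.1)) := by
  intro L
  by_cases hle : L ≤ pvLvl h
  · have hnot : ¬ pvLvl h < L := not_lt_of_ge hle
    have hdrop : ((stack.dropWhile (fun e => pvLvl h ≤ e.1)).dropWhile (fun e => L ≤ e.1))
        = stack.dropWhile (fun e => L ≤ e.1) := by
      apply pv_dropWhile_dropWhile
      intro x hx
      simp only [decide_eq_true_eq] at hx ⊢
      exact le_trans hle hx
    rw [List.dropWhile_cons, if_pos (by simpa using hle), hdrop,
      List.find?_cons_of_neg (by simpa using hnot)]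
    exact hinv L
  · have hlt : pvLvl h < L := lt_of_not_ge hle
    rw [List.dropWhile_cons, if_neg (by simpa using hle),
      List.find?_cons_of_pos (by simpa using hlt)]
    rfl

lemma pvGoA_eq_pvGoB :
    ∀ (rest : List (List (String × String))) (seen : List (List (String × String)))
      (stack : List (String × String)), pvInv seen stack → pvGoA stack rest = pvGoB seen rest := by
  intro rest
  induction rest with
  | nil => intro seen stack _; rfl
  | cons h t ih =>
    intro seen stack hinv
    have hpar : ((stack.dropWhile (fun e => pvLvl h ≤ e.1)).head?).map (·.2)
        = pvParentB (pvLvl h) seen := by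
      rw [hinv (pvLvl h), pvParentB_eq_find]
      cases seen.find? (fun h' => decide (pvLvl h' < pvLvl h)) <;> rfl
    simp only [pvGoA, pvGoB, hpar]
    exact congrArg _ (ih (h :: seen) _ (pvInv_step seen stack h hinv))

-- ===== VERDICT (by name: the statement is the Claim_ definition above) =====
theorem build_heading_hierarchy_with_nesting_py_spec : Claim_equal_build_heading_hierarchy_with_nesting_py := by
  intro headings _ _
  unfold Spec_build_heading_hierarchy_with_nesting_py
  unfold build_heading_hierarchy_with_nesting_py build_heading_hierarchy_with_nesting_py_alt
  cases headings with
  | nil => rfl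
  | cons h t =>
    simp only [List.isEmpty_cons, Bool.false_eq_true, if_false]
    exact pvGoA_eq_pvGoB (h :: t) [] [] (by intro L; rfl)
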